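-- pv_equiv track=rewrite | github.com/pearlde-bink/Python_PTIT | thuGonDaySo.py | shortenList
-- ===== SOURCE A (Python) =====
-- def shortenList(A):
--     Acopy = A.copy()
--     i = 0
--     while i < len(Acopy) - 1:
--         if (Acopy[i] + Acopy[i + 1]) % 2 == 0:
--             Acopy.pop(i)
--             Acopy.pop(i)
--             if i > 0:
--                 i -= 1
--         else:
--             i += 1
--     return len(Acopy)
-- ===== SOURCE B (Python) =====
-- def shortenList(A):
--     stack = []
--     for x in A:
--         if stack and (stack[-1] + x) % 2 == 0:
--             stack.pop()
--         else:
--             stack.append(x)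
--     return len(stack)
-- ===== Notes on version B (the rewrite author's own statement) =====
-- stated objective: faster
-- what changed: Replaces the index-walking while loop with repeated pop(i) (quadratic list shifting) by a single left-to-right pass maintaining a stack: pop the top when it has the same parity as the current element, else push.
import Mathlib
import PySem

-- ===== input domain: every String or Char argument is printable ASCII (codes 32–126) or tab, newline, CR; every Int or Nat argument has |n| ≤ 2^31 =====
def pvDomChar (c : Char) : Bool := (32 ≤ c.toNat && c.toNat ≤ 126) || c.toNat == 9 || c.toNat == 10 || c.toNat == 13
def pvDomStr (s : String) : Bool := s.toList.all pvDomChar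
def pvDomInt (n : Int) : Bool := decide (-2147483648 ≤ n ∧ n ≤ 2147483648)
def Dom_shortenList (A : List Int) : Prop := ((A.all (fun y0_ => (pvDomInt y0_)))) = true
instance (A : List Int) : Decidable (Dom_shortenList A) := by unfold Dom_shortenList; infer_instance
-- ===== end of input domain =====

-- B replaces A's quadratic index-walking pop(i) loop by a one-pass parity stack (asymptotically faster); return value only, A does not mutate its argument.

-- ===== PORT A =====
-- A's while loop over state (Acopy, i); 'i -= 1 if i > 0' is Nat truncated subtraction i - 1.
def shortenLoop (L : List Int) (i : Nat) : Nat :=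
  if _h : i + 1 < L.length then
    if PySem.Int.mod (L.getD i 0 + L.getD (i + 1) 0) 2 == 0 then
      shortenLoop ((L.eraseIdx i).eraseIdx i) (i - 1)
    else
      shortenLoop L (i + 1)
  else
    L.length
termination_by 2 * L.length - i
decreasing_by
  · have h1 : (L.eraseIdx i).length = L.length - 1 := by
      rw [List.length_eraseIdx_of_lt]; omega
    have h2 : ((L.eraseIdx i).eraseIdx i).length = L.length - 2 := by
      rw [List.length_eraseIdx_of_lt] <;> omega
    omega
  · omega

def shortenList (A : List Int) : Int := (shortenLoop A 0 : Int)

-- ===== PORT B =====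
def bstep (s : List Int) (x : Int) : List Int :=
  match s with
  | t :: r => if PySem.Int.mod (t + x) 2 == 0 then r else x :: t :: r
  | [] => [x]

def shortenList_alt (A : List Int) : Int := ((A.foldl bstep []).length : Int)

-- ===== PRECONDITION & SPEC =====
def Spec_shortenList (A : List Int) (out : Int) : Prop := out = shortenList_alt A
instance (A : List Int) (out : Int) : Decidable (Spec_shortenList A out) := by unfold Spec_shortenList; infer_instance

-- ===== CLAIM (what is proved, stated in full; the proofs are below) =====
def Claim_equal_shortenList : Prop := ∀ (A : List Int), Dom_shortenList A → Spec_shortenList A (shortenList A)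

-- ===== LEMMAS AND PROOFS =====

-- Correspondence: A's state (prefix ++ rest, i) with i pointing at the last prefix element
-- equals B's stack state (prefix reversed, rest still to process).
lemma shortenLoop_stack (s rest : List Int) (hs : s ≠ []) :
    shortenLoop (s.reverse ++ rest) (s.length - 1) = (List.foldl bstep s rest).length := by
  match s, rest with
  | t :: r, [] =>
      rw [shortenLoop]
      simp
  | t :: r, x :: rest' =>
      rw [shortenLoop]
      have hlen : (t :: r).length - 1 + 1 < ((t :: r).reverse ++ x :: rest').length := by
        simp
      have hrev : (t :: r).reverse ++ x :: rest' = r.reverse ++ (t :: x :: rest') := by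
        simp
      have hget1 : ((t :: r).reverse ++ x :: rest').getD ((t :: r).length - 1) 0 = t := by
        rw [hrev, List.getD_append_right _ _ _ _ (by simp)]
        simp
      have hget2 : ((t :: r).reverse ++ x :: rest').getD ((t :: r).length - 1 + 1) 0 = x := by
        rw [hrev, List.getD_append_right _ _ _ _ (by simp)]
        simp
      rw [dif_pos hlen, hget1, hget2]
      have herase : (((t :: r).reverse ++ x :: rest').eraseIdx ((t :: r).length - 1)).eraseIdx
          ((t :: r).length - 1) = r.reverse ++ rest' := by
        rw [hrev]
        have h1 : (t :: r).length - 1 = r.reverse.length := by simp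
        rw [h1, List.eraseIdx_append, if_neg (by omega), Nat.sub_self,
          List.eraseIdx_append, if_neg (by omega), Nat.sub_self]
        simp [List.eraseIdx]
      by_cases hd : (2 : Int) ∣ t + x
      · have hcond : (PySem.Int.mod (t + x) 2 == 0) = true := by
          simp [hd]
        rw [if_pos hcond, herase]
        cases r with
        | nil =>
            -- stack becomes empty: A restarts at index 0, B starts pushing on the empty stack
            simp only [List.reverse_nil, List.nil_append, List.length_cons, List.length_nil]
            cases rest' with
            | nil => rw [shortenLoop]; simp [bstep, hd]
            | cons y ys =>
                have := shortenLoop_stack [y] ys (by simp)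
                simp only [List.reverse_cons, List.reverse_nil, List.nil_append,
                  List.singleton_append, List.length_cons, List.length_nil] at this
                rw [show (1 : Nat) - 1 = 0 from rfl] at this
                rw [this]
                simp [bstep, hd]
        | cons t' r' =>
            have := shortenLoop_stack (t' :: r') rest' (by simp)
            simp only [List.length_cons, Nat.add_sub_cancel] at this ⊢
            rw [this]
            simp [bstep, hd]
      · have hcond : (PySem.Int.mod (t + x) 2 == 0) = false := by
          simp [hd]
        rw [if_neg (by rw [hcond]; simp)]
        have := shortenLoop_stack (x :: t :: r) rest' (by simp)
        have hre : (x :: t :: r).reverse ++ rest' = (t :: r).reverse ++ x :: rest' := by simp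
        rw [hre] at this
        simp only [List.length_cons, Nat.add_sub_cancel] at this ⊢
        rw [this]
        simp [bstep, hd]
termination_by 2 * rest.length + s.length
decreasing_by
  all_goals subst_vars
  all_goals simp
  all_goals omega

-- ===== VERDICT (by name: the statement is the Claim_ definition above) =====
theorem shortenList_spec : Claim_equal_shortenList := by
  intro A _
  unfold Spec_shortenList shortenList shortenList_alt
  cases A with
  | nil => rw [shortenLoop]; simp
  | cons x r =>
      have := shortenLoop_stack [x] r (by simp)
      simp only [List.reverse_cons, List.reverse_nil, List.nil_append, List.singleton_append,
        List.length_cons, List.length_nil] at this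
      rw [this]
      simp [bstep]
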